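-- pv_equiv track=rewrite | github.com/BBO513/guardian-node | guardian-node/guardian_interpreter/protocols/wifi_security_protocol.py | _determine_wifi_status
-- ===== SOURCE A (Python) =====
-- from typing import Dict, List, Any, Optional
--
-- def _determine_wifi_status(findings: List[Dict[str, Any]]) -> str:
--     """Determine overall WiFi security status"""
--     if not findings:
--         return 'secure'
--
--     # Check for critical findings
--     critical_count = 0
--     high_count = 0
--     medium_count = 0
--
--     for finding in findings:
--         severity = finding.get('severity', 'info').lower()
--         if severity == 'critical':
--             critical_count += 1
--         elif severity == 'high':
--             high_count += 1
--         elif severity == 'medium':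
--             medium_count += 1
--
--     # Determine status based on severity counts
--     if critical_count > 0:
--         return 'critical'
--     elif high_count > 0 or medium_count >= 3:
--         return 'warning'
--     elif medium_count > 0:
--         return 'warning'
--
--     return 'secure'
-- ===== SOURCE B (Python) =====
-- def _determine_wifi_status(findings):
--     """Determine overall WiFi security status"""
--     rank = {'critical': 3, 'high': 2, 'medium': 1}
--     level = max((rank.get(f.get('severity', 'info').lower(), 0) for f in findings), default=0)
--     if level == 3:
--         return 'critical'
--     if level >= 1:
--         return 'warning'
--     return 'secure'
-- ===== Notes on version B (the rewrite author's own statement) =====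
-- stated objective: simpler
-- what changed: Replaces the three separate severity counters and the four-branch decision (whose medium>=3 clause is dead) with a single max-severity-rank reduction mapped back to a status word.
import Mathlib
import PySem

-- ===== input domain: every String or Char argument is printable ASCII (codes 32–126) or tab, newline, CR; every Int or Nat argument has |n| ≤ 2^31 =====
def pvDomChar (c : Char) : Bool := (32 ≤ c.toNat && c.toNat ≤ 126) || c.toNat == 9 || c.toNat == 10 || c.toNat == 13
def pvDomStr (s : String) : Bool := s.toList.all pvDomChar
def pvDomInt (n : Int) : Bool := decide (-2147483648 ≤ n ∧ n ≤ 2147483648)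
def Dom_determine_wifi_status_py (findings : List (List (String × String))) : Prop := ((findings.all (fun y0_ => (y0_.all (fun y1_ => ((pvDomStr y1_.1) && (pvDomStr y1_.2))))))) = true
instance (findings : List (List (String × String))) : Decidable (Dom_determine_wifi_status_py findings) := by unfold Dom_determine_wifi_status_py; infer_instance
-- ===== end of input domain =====

-- B replaces A's three severity counters and four-branch decision by a single
-- max-severity-rank reduction translated back to a status word (objective: simpler).

-- ===== PORT A =====
def determine_wifi_status_py (findings : List (List (String × String))) : String :=
  if findings = [] then "secure"
  else
    let st := findings.foldl (fun (acc : Int × Int × Int) finding =>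
      let severity := PySem.Str.lower (PySem.Dict.getD (PySem.Dict.mk finding) "severity" "info")
      if severity = "critical" then (acc.1 + 1, acc.2.1, acc.2.2)
      else if severity = "high" then (acc.1, acc.2.1 + 1, acc.2.2)
      else if severity = "medium" then (acc.1, acc.2.1, acc.2.2 + 1)
      else acc) (0, 0, 0)
    if st.1 > 0 then "critical"
    else if st.2.1 > 0 ∨ st.2.2 ≥ 3 then "warning"
    else if st.2.2 > 0 then "warning"
    else "secure"

-- ===== PORT B =====
def determine_wifi_status_py_alt (findings : List (List (String × String))) : String :=
  let rank : PySem.Dict String Int := PySem.Dict.mk [("critical", 3), ("high", 2), ("medium", 1)]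
  let level : Int := (findings.map (fun f =>
      PySem.Dict.getD rank (PySem.Str.lower (PySem.Dict.getD (PySem.Dict.mk f) "severity" "info")) 0)).foldl max 0
  if level = 3 then "critical"
  else if level ≥ 1 then "warning"
  else "secure"

-- ===== PRECONDITION & SPEC =====
def Spec_determine_wifi_status_py (findings : List (List (String × String))) (out : String) : Prop := out = determine_wifi_status_py_alt findings
instance (findings : List (List (String × String))) (out : String) : Decidable (Spec_determine_wifi_status_py findings out) := by unfold Spec_determine_wifi_status_py; infer_instance

-- ===== CLAIM (what is proved, stated in full; the proofs are below) =====
def Claim_equal_determine_wifi_status_py : Prop := ∀ (findings : List (List (String × String))), Dom_determine_wifi_status_py findings → Spec_determine_wifi_status_py findings (determine_wifi_status_py findings)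

-- ===== LEMMAS AND PROOFS =====

-- A's counting step and B's per-finding rank, named for the invariant proof
def pvStepA (acc : Int × Int × Int) (finding : List (String × String)) : Int × Int × Int :=
  let severity := PySem.Str.lower (PySem.Dict.getD (PySem.Dict.mk finding) "severity" "info")
  if severity = "critical" then (acc.1 + 1, acc.2.1, acc.2.2)
  else if severity = "high" then (acc.1, acc.2.1 + 1, acc.2.2)
  else if severity = "medium" then (acc.1, acc.2.1, acc.2.2 + 1)
  else acc

def pvRank (f : List (String × String)) : Int :=
  PySem.Dict.getD (PySem.Dict.mk [("critical", (3:Int)), ("high", 2), ("medium", 1)])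
    (PySem.Str.lower (PySem.Dict.getD (PySem.Dict.mk f) "severity" "info")) 0

lemma pvRankStr (s : String) :
    PySem.Dict.getD (PySem.Dict.mk [("critical", (3:Int)), ("high", 2), ("medium", 1)]) s 0 =
      if s = "critical" then 3 else if s = "high" then 2 else if s = "medium" then 1 else 0 := by
  by_cases h1 : s = "critical"
  · subst h1; decide
  by_cases h2 : s = "high"
  · subst h2; decide
  by_cases h3 : s = "medium"
  · subst h3; decide
  have c1 : ("critical" == s) = false := by simpa using Ne.symm h1
  have c2 : ("high" == s) = false := by simpa using Ne.symm h2
  have c3 : ("medium" == s) = false := by simpa using Ne.symm h3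
  simp [PySem.Dict.getD, PySem.Dict.get?, List.find?, h1, h2, h3, c1, c2, c3]

lemma pv_loop_inv (fs : List (List (String × String))) :
    ∀ (c h m l : Int),
    0 ≤ c → 0 ≤ h → 0 ≤ m → 0 ≤ l → l ≤ 3 →
    (l = 3 ↔ 0 < c) → (1 ≤ l ↔ (0 < c ∨ 0 < h ∨ 0 < m)) →
    (let st := fs.foldl pvStepA (c, h, m)
     let l' := fs.foldl (fun acc f => max acc (pvRank f)) l
     l' ≤ 3 ∧ (l' = 3 ↔ 0 < st.1) ∧ (1 ≤ l' ↔ (0 < st.1 ∨ 0 < st.2.1 ∨ 0 < st.2.2))) := by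
  induction fs with
  | nil => intro c h m l _ _ _ _ hle h3 h1; exact ⟨hle, h3, h1⟩
  | cons f fs ih =>
    intro c h m l hc hh hm hl0 hle h3 h1
    simp only [List.foldl_cons]
    have hrank : pvRank f =
        if PySem.Str.lower (PySem.Dict.getD (PySem.Dict.mk f) "severity" "info") = "critical" then 3
        else if PySem.Str.lower (PySem.Dict.getD (PySem.Dict.mk f) "severity" "info") = "high" then 2
        else if PySem.Str.lower (PySem.Dict.getD (PySem.Dict.mk f) "severity" "info") = "medium" then 1
        else 0 := pvRankStr _
    by_cases hs1 : PySem.Str.lower (PySem.Dict.getD (PySem.Dict.mk f) "severity" "info") = "critical"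
    · have hA : pvStepA (c, h, m) f = (c + 1, h, m) := by simp [pvStepA, hs1]
      have hr : pvRank f = 3 := by rw [hrank]; simp [hs1]
      rw [hA, hr]
      exact ih (c + 1) h m (max l 3) (by omega) hh hm (by omega) (by omega) (by omega) (by omega)
    by_cases hs2 : PySem.Str.lower (PySem.Dict.getD (PySem.Dict.mk f) "severity" "info") = "high"
    · have hA : pvStepA (c, h, m) f = (c, h + 1, m) := by simp [pvStepA, hs1, hs2]
      have hr : pvRank f = 2 := by rw [hrank]; simp [hs1, hs2]
      rw [hA, hr]
      exact ih c (h + 1) m (max l 2) hc (by omega) hm (by omega) (by omega) (by omega) (by omega)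
    by_cases hs3 : PySem.Str.lower (PySem.Dict.getD (PySem.Dict.mk f) "severity" "info") = "medium"
    · have hA : pvStepA (c, h, m) f = (c, h, m + 1) := by simp [pvStepA, hs1, hs2, hs3]
      have hr : pvRank f = 1 := by rw [hrank]; simp [hs1, hs2, hs3]
      rw [hA, hr]
      exact ih c h (m + 1) (max l 1) hc hh (by omega) (by omega) (by omega) (by omega) (by omega)
    have hA : pvStepA (c, h, m) f = (c, h, m) := by simp [pvStepA, hs1, hs2, hs3]
    have hr : pvRank f = 0 := by rw [hrank]; simp [hs1, hs2, hs3]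
    rw [hA, hr]
    exact ih c h m (max l 0) hc hh hm (by omega) (by omega) (by omega) (by omega)

-- ===== VERDICT (by name: the statement is the Claim_ definition above) =====
theorem determine_wifi_status_py_spec : Claim_equal_determine_wifi_status_py := by
  intro findings _
  unfold Spec_determine_wifi_status_py determine_wifi_status_py determine_wifi_status_py_alt
  have hfold : (findings.map pvRank).foldl max (0:Int) =
      findings.foldl (fun acc f => max acc (pvRank f)) 0 := List.foldl_map ..
  have H := pv_loop_inv findings 0 0 0 0 le_rfl le_rfl le_rfl le_rfl (by omega) (by omega) (by omega)
  rcases H with ⟨hle, h3, h1⟩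
  rcases findings with _ | ⟨f, fs⟩
  · simp
  · simp only [if_neg (by simp : ¬ (f :: fs) = [])]
    show (if ((f :: fs).foldl pvStepA (0,0,0)).1 > 0 then "critical"
      else if ((f :: fs).foldl pvStepA (0,0,0)).2.1 > 0 ∨ ((f :: fs).foldl pvStepA (0,0,0)).2.2 ≥ 3 then "warning"
      else if ((f :: fs).foldl pvStepA (0,0,0)).2.2 > 0 then "warning"
      else "secure") =
      (if ((f :: fs).map pvRank).foldl max (0:Int) = 3 then "critical"
       else if ((f :: fs).map pvRank).foldl max (0:Int) ≥ 1 then "warning"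
       else "secure")
    rw [hfold]
    set st := (f :: fs).foldl pvStepA (0, 0, 0)
    set l' := (f :: fs).foldl (fun acc g => max acc (pvRank g)) (0:Int)
    by_cases hcr : 0 < st.1
    · rw [if_pos hcr, if_pos (h3.mpr hcr)]
    · rw [if_neg hcr, if_neg (fun h => hcr (h3.mp h))]
      by_cases hw : 0 < st.2.1 ∨ st.2.2 ≥ 3
      · rw [if_pos hw, if_pos (h1.mpr (by omega))]
      · rw [if_neg hw]
        by_cases hm : 0 < st.2.2
        · rw [if_pos hm, if_pos (h1.mpr (by omega))]
        · rw [if_neg hm, if_neg (by intro h; rcases h1.mp h with h' | h' | h' <;> omega)]
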